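-- pv_equiv track=rewrite | github.com/ethanKim93/algorithm_group_study | 0929/송진섭/ex3/s1.py | search_start
-- ===== SOURCE A (Python) =====
-- code = {
--     '001101': 0, '010011': 1,
--     '111011': 2, '110001': 3,
--     '100011': 4, '110111': 5,
--     '001011': 6, '111101': 7,
--     '011001': 8, '101111': 9
--     }
--
-- def search_start(a_str):
--     for j in range(0, len(a_str)):
--         if a_str[j] == '1':
--             for code_pattern in code.keys():
--                 if code_pattern[::-1] == a_str[j:j + 6]:
--                     point = j
--                     return point
--     return -1
-- ===== SOURCE B (Python) =====
-- code = {
--     '001101': 0, '010011': 1,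
--     '111011': 2, '110001': 3,
--     '100011': 4, '110111': 5,
--     '001011': 6, '111101': 7,
--     '011001': 8, '101111': 9
--     }
--
-- _REV = [p[::-1] for p in code]
--
-- def search_start(a_str):
--     hits = [i for i in (a_str.find(p) for p in _REV) if i >= 0]
--     return min(hits) if hits else -1
-- ===== Notes on version B (the rewrite author's own statement) =====
-- stated objective: faster
-- what changed: Replaces the left-to-right index scan with a per-position inner loop over the ten patterns by ten independent str.find searches for the pre-reversed patterns, returning the minimum non-negative hit index (or -1 if none); the per-character guard disappears because every reversed pattern begins with the same character it tested for.
import Mathlib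
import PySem

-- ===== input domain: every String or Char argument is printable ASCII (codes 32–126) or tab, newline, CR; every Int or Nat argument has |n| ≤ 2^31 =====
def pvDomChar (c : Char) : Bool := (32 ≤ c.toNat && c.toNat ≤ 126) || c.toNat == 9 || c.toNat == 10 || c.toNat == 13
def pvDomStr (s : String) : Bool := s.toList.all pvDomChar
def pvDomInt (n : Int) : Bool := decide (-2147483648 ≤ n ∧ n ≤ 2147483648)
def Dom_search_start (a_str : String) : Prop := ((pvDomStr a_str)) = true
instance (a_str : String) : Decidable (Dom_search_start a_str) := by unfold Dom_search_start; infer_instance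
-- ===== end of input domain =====

-- B replaces A's left-to-right index scan with an inner loop over the ten patterns by ten
-- str.find searches for the pre-reversed patterns, taking the minimum non-negative hit
-- index (the per-character guard is subsumed by the patterns' first character);
-- measurably faster by a constant factor (str.find does the scanning).

-- ===== PORT A =====
def pvCode : PySem.Dict String Int :=
  PySem.Dict.ofList [("001101", 0), ("010011", 1),
    ("111011", 2), ("110001", 3),
    ("100011", 4), ("110111", 5),
    ("001011", 6), ("111101", 7),
    ("011001", 8), ("101111", 9)]

-- the inner 'for code_pattern in code.keys(): if code_pattern[::-1] == a_str[j:j+6]: return j'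
def pvInner (a_str : String) (j : Int) : List String → Option Int
  | [] => none
  | p :: rest =>
    if PySem.Str.slice? p none none (-1) = some (PySem.Str.slice a_str (some j) (some (j + 6))) then
      some j
    else pvInner a_str j rest

def search_start (a_str : String) : Int :=
  ((PySem.List.pyRange 0 (PySem.Str.len a_str) 1).foldl
    (fun acc j =>
      match acc with
      | some r => some r
      | none =>
        if PySem.Str.pyGet? a_str j = some '1' then pvInner a_str j pvCode.keys
        else none) none).getD (-1)

-- ===== PORT B =====
-- _REV = [p[::-1] for p in code]   (iterates the same module-level dict 'code')
def pvRev : List String :=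
  pvCode.keys.map (fun p => (PySem.Str.slice? p none none (-1)).getD "")

def search_start_alt (a_str : String) : Int :=
  let hits := (pvRev.map (fun p => PySem.Str.find a_str p)).filter (fun i => decide (0 ≤ i))
  match PySem.List.min? hits id with
  | some m => m
  | none => -1

-- ===== PRECONDITION & SPEC =====
def Spec_search_start (a_str : String) (out : Int) : Prop := out = search_start_alt a_str
instance (a_str : String) (out : Int) : Decidable (Spec_search_start a_str out) := by unfold Spec_search_start; infer_instance

-- ===== CLAIM (what is proved, stated in full; the proofs are below) =====
def Claim_equal_search_start : Prop := ∀ (a_str : String), Dom_search_start a_str → Spec_search_start a_str (search_start a_str)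

-- ===== LEMMAS AND PROOFS =====

-- Bool test used throughout the proof: some reversed pattern matches at position k
def pvPb (l : List Char) (k : ℕ) : Bool := pvRev.any (fun q => q.toList.isPrefixOf (l.drop k))

theorem pvRev_len : ∀ q ∈ pvRev, q.toList.length = 6 := by decide

theorem pvRev_head : ∀ q ∈ pvRev, q.toList[0]? = some '1' := by decide

-- an accumulator that is already 'some' never changes
theorem pvFoldStay (g : Int → Option Int) (L : List Int) (r : Int) :
    L.foldl (fun acc j => match acc with | some r' => some r' | none => g j) (some r) = some r := by
  induction L with
  | nil => rfl
  | cons x xs ih => simpa [List.foldl] using ih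

-- the early-exit loop shape computes find?
theorem pvFoldFirst (q : Int → Bool) (L : List Int) :
    L.foldl (fun acc j => match acc with | some r' => some r' | none => if q j then some j else none)
      none = L.find? q := by
  induction L with
  | nil => rfl
  | cons x xs ih =>
    by_cases h : q x = true
    · simp [List.foldl, h, pvFoldStay]
    · simp [List.foldl, h, ih]

theorem pvInner_eq (a : String) (j : Int) (L : List String) :
    pvInner a j L =
      if ∃ p ∈ L, PySem.Str.slice? p none none (-1)
          = some (PySem.Str.slice a (some j) (some (j + 6))) then some j else none := by
  induction L with
  | nil => simp [pvInner]
  | cons p rest ih =>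
    by_cases hp : PySem.Str.slice? p none none (-1)
        = some (PySem.Str.slice a (some j) (some (j + 6)))
    · simp [pvInner, hp]
    · simp [pvInner, hp, ih]

-- first hit of a boolean predicate over range n
theorem pvFindRange_some (p : ℕ → Bool) (n : ℕ) (h : ∃ k, p k = true) (hn : Nat.find h < n) :
    (List.range n).find? p = some (Nat.find h) := by
  induction n with
  | zero => omega
  | succ n ih =>
    rw [List.range_succ, List.find?_append]
    by_cases h' : Nat.find h < n
    · rw [ih h']; rfl
    · have he : Nat.find h = n := by omega
      have hnone : (List.range n).find? p = none := by
        rw [List.find?_eq_none]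
        intro x hx
        have hxn : x < Nat.find h := by rw [he]; exact List.mem_range.mp hx
        simpa using Nat.find_min h hxn
      have hpn : p n = true := he ▸ Nat.find_spec h
      simp [hnone, List.find?, hpn, he]

-- the central pointwise equivalence: A's per-index condition ⟺ some reversed pattern is a
-- prefix of l.drop k
theorem pvCentral (a : String) (k : ℕ) :
    ((PySem.Str.pyGet? a (k : Int) = some '1') ∧
      ∃ p ∈ pvCode.keys, PySem.Str.slice? p none none (-1)
        = some (PySem.Str.slice a (some (k : Int)) (some ((k : Int) + 6)))) ↔
    ∃ q ∈ pvRev, q.toList <+: a.toList.drop k := by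
  have hX : (PySem.Str.slice a (some (k : Int)) (some ((k : Int) + 6))).toList
      = (a.toList.drop k).take 6 := by
    rw [PySem.Str.toList_slice, PySem.Chars.slice_eq_listSlice]
    have h6 : ((k : Int) + 6) = ((k + 6 : ℕ) : Int) := by push_cast; ring
    rw [h6, PySem.List.slice_natCast]
    congr 1
    omega
  have hkeys : (∃ p ∈ pvCode.keys, PySem.Str.slice? p none none (-1)
        = some (PySem.Str.slice a (some (k : Int)) (some ((k : Int) + 6)))) ↔
      ∃ q ∈ pvRev, q.toList = (a.toList.drop k).take 6 := by
    simp only [pvRev, List.mem_map, PySem.Str.slice?_none_none_neg_one, Option.getD_some,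
      Option.some.injEq]
    constructor
    · rintro ⟨p, hp, he⟩
      exact ⟨String.ofList p.toList.reverse, ⟨p, hp, rfl⟩, by rw [he, hX]⟩
    · rintro ⟨q, ⟨p, hp, hq⟩, he⟩
      refine ⟨p, hp, ?_⟩
      rw [← String.toList_inj, hq, he, hX]
  constructor
  · rintro ⟨h1, hp⟩
    obtain ⟨q, hq, he⟩ := hkeys.mp hp
    refine ⟨q, hq, ?_⟩
    rw [List.prefix_iff_eq_take, pvRev_len q hq]
    exact he
  · rintro ⟨q, hq, hpre⟩
    constructor
    · obtain ⟨t, ht⟩ := hpre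
      have hlen : 0 < q.toList.length := by rw [pvRev_len q hq]; omega
      have h0 : (a.toList.drop k)[0]? = some '1' := by
        rw [← ht, List.getElem?_append_left hlen]
        exact pvRev_head q hq
      rw [List.getElem?_drop] at h0
      simpa using h0
    · refine hkeys.mpr ⟨q, hq, ?_⟩
      rw [List.prefix_iff_eq_take, pvRev_len q hq] at hpre
      exact hpre

-- membership in a reversed pattern being a prefix at k means pvPb, and vice versa
theorem pvPb_iff (l : List Char) (k : ℕ) :
    pvPb l k = true ↔ ∃ q ∈ pvRev, q.toList <+: l.drop k := by
  simp [pvPb, List.isPrefixOf_iff_prefix]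

-- characterisation of port A
theorem pvA_char (a : String) :
    search_start a =
      (((List.range a.toList.length).find? (pvPb a.toList)).map (fun k => (k : Int))).getD (-1) := by
  have hbody : (fun (acc : Option Int) (j : Int) =>
      match acc with
      | some r => some r
      | none =>
        if PySem.Str.pyGet? a j = some '1' then pvInner a j pvCode.keys else none)
      = (fun acc j =>
      match acc with
      | some r => some r
      | none =>
        if (decide ((PySem.Str.pyGet? a j = some '1') ∧
            ∃ p ∈ pvCode.keys, PySem.Str.slice? p none none (-1)
              = some (PySem.Str.slice a (some j) (some (j + 6))))) then some j else none) := by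
    funext acc j
    cases acc with
    | some r => rfl
    | none =>
      rw [pvInner_eq]
      by_cases h1 : PySem.List.pyGet? a.toList j = some '1'
      · by_cases h2 : ∃ p ∈ pvCode.keys, PySem.Str.slice? p none none (-1)
            = some (PySem.Str.slice a (some j) (some (j + 6))) <;>
          simp [h1, h2]
      · simp [h1]
  have hq : ((fun j => decide ((PySem.Str.pyGet? a j = some '1') ∧
        ∃ p ∈ pvCode.keys, PySem.Str.slice? p none none (-1)
          = some (PySem.Str.slice a (some j) (some (j + 6))))) ∘ (fun k : ℕ => (k : Int)))
      = pvPb a.toList := by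
    funext k
    simp only [Function.comp]
    rw [Bool.eq_iff_iff, decide_eq_true_eq, pvCentral a k, pvPb_iff]
  rw [search_start, hbody, pvFoldFirst, PySem.Str.len_eq, PySem.List.pyRange_zero_natCast,
    List.find?_map, hq]
  cases (List.range a.toList.length).find? (pvPb a.toList) <;> rfl

-- hits of port B are exactly the non-negative find results; each find hit witnesses pvPb
theorem pvB_hits_ge (a : String) (h : ∃ k, pvPb a.toList k = true) (i : Int)
    (hi : i ∈ (pvRev.map (fun p => PySem.Str.find a p)).filter (fun i => decide (0 ≤ i))) :
    ((Nat.find h : ℕ) : Int) ≤ i := by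
  obtain ⟨him, hnn⟩ := List.mem_filter.mp hi
  obtain ⟨p, hp, hpi⟩ := List.mem_map.mp him
  have h0 : (0 : Int) ≤ i := of_decide_eq_true hnn
  rw [← hpi, PySem.Str.find_eq] at h0 ⊢
  obtain ⟨hpref, -⟩ := PySem.Chars.find_spec h0
  have hb : pvPb a.toList (PySem.Chars.find a.toList p.toList).toNat = true :=
    (pvPb_iff _ _).mpr ⟨p, hp, hpref⟩
  have := Nat.find_min' h hb
  omega

theorem pvB_find_at (a : String) (h : ∃ k, pvPb a.toList k = true) (q : String) (hq : q ∈ pvRev)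
    (hpre : q.toList <+: a.toList.drop (Nat.find h)) :
    PySem.Chars.find a.toList q.toList = ((Nat.find h : ℕ) : Int) := by
  have hinf : q.toList <:+: a.toList :=
    hpre.isInfix.trans (List.drop_suffix _ _).isInfix
  have hne : PySem.Chars.find a.toList q.toList ≠ -1 :=
    (PySem.Chars.find_ne_neg_one_iff _ _).mpr hinf
  have hg := PySem.Chars.neg_one_le_find a.toList q.toList
  have h0 : (0 : Int) ≤ PySem.Chars.find a.toList q.toList := by omega
  obtain ⟨hpref, hmin⟩ := PySem.Chars.find_spec h0
  have h1 : Nat.find h ≤ (PySem.Chars.find a.toList q.toList).toNat :=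
    Nat.find_min' h ((pvPb_iff _ _).mpr ⟨q, hq, hpref⟩)
  have h2 : (PySem.Chars.find a.toList q.toList).toNat ≤ Nat.find h := by
    by_contra hc
    exact hmin (Nat.find h) (by omega) hpre
  omega

-- ===== VERDICT (by name: the statement is the Claim_ definition above) =====
theorem search_start_spec : Claim_equal_search_start := by
  intro a _
  unfold Spec_search_start
  rw [pvA_char]
  by_cases h : ∃ k, pvPb a.toList k = true
  · have hms : pvPb a.toList (Nat.find h) = true := Nat.find_spec h
    obtain ⟨q, hq, hpre⟩ := (pvPb_iff _ _).mp hms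
    have hmlen : Nat.find h < a.toList.length := by
      by_contra hc
      have hnil : a.toList.drop (Nat.find h) = [] := List.drop_eq_nil_of_le (by omega)
      have := hpre.length_le
      rw [hnil, pvRev_len q hq] at this
      simp at this
    rw [pvFindRange_some (pvPb a.toList) a.toList.length h hmlen]
    have hmem : ((Nat.find h : ℕ) : Int) ∈
        (pvRev.map (fun p => PySem.Str.find a p)).filter (fun i => decide (0 ≤ i)) := by
      refine List.mem_filter.mpr ⟨List.mem_map.mpr ⟨q, hq, ?_⟩, by simp⟩
      rw [PySem.Str.find_eq, pvB_find_at a h q hq hpre]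
    simp only [search_start_alt]
    cases hmm : PySem.List.min?
        ((pvRev.map (fun p => PySem.Str.find a p)).filter (fun i => decide (0 ≤ i))) id with
    | none =>
      rw [PySem.List.min?_eq_none_iff] at hmm
      rw [hmm] at hmem
      simp at hmem
    | some x =>
      have hx1 : x ≤ ((Nat.find h : ℕ) : Int) := PySem.List.min?_isMin hmm _ hmem
      have hx2 : ((Nat.find h : ℕ) : Int) ≤ x := pvB_hits_ge a h x (PySem.List.min?_mem hmm)
      have hxe : x = ((Nat.find h : ℕ) : Int) := le_antisymm hx1 hx2
      subst hxe
      simp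
  · have hfnone : (List.range a.toList.length).find? (pvPb a.toList) = none := by
      rw [List.find?_eq_none]
      intro x _
      simpa using fun hx => h ⟨x, hx⟩
    have hfilter : (pvRev.map (fun p => PySem.Str.find a p)).filter (fun i => decide (0 ≤ i)) = [] := by
      rw [List.filter_eq_nil_iff]
      intro i him
      obtain ⟨p, hp, hpi⟩ := List.mem_map.mp him
      simp only [decide_eq_true_eq]
      intro h0
      rw [← hpi, PySem.Str.find_eq] at h0
      obtain ⟨hpref, -⟩ := PySem.Chars.find_spec h0
      exact h ⟨_, (pvPb_iff _ _).mpr ⟨p, hp, hpref⟩⟩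
    simp only [search_start_alt, hfilter]
    rw [hfnone]
    rfl
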